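-- pv_equiv track=rewrite | github.com/Jico6/report-of-the-week | report_of_the_week.py | nbr_username
-- ===== SOURCE A (Python) =====
-- def nbr_username(username_list_all):
--     scoreboard = {}
--
--     for username in username_list_all:
--         if username not in scoreboard:
--             scoreboard[username] = 1
--         else:
--             scoreboard[username] = scoreboard[username] + 1
--
--     return(scoreboard)
-- ===== SOURCE B (Python) =====
-- def nbr_username(username_list_all):
--     # Count each distinct username (in first-occurrence order) by rescanning the whole list.
--     return {u: username_list_all.count(u) for u in dict.fromkeys(username_list_all)}
-- ===== Notes on version B (the rewrite author's own statement) =====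
-- stated objective: simpler
-- what changed: Replaced the single accumulating dict pass with a dedup-then-rescan comprehension: distinct keys first, then list.count for each.
import Mathlib
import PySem

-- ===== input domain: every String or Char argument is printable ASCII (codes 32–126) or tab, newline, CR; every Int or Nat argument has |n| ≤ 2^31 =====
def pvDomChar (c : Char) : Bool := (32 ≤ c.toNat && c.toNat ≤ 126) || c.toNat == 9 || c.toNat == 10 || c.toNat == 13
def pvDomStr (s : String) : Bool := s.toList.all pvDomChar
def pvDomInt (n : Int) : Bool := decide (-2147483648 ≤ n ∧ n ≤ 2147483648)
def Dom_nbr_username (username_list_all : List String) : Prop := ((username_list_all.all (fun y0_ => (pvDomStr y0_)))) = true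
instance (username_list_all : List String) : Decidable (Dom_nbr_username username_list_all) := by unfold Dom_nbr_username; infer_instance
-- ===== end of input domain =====

-- ===== PORT A =====
-- One line: B replaces A's single accumulating pass by dedup-then-rescan counting (simpler, not faster).
def nbr_username (username_list_all : List String) : List (String × Int) :=
  (username_list_all.foldl
    (fun scoreboard username =>
      match scoreboard.get? username with
      | none => scoreboard.insert username 1
      | some v => scoreboard.insert username (v + 1))
    (PySem.Dict.empty : PySem.Dict String Int)).items

-- ===== PORT B =====
def nbr_username_alt (username_list_all : List String) : List (String × Int) :=
  (PySem.List.dedup username_list_all).map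
    (fun u => (u, (username_list_all.count u : Int)))

-- ===== PRECONDITION & SPEC =====
def Spec_nbr_username (username_list_all : List String) (out : List (String × Int)) : Prop := out = nbr_username_alt username_list_all
instance (username_list_all : List String) (out : List (String × Int)) : Decidable (Spec_nbr_username username_list_all out) := by unfold Spec_nbr_username; infer_instance

-- ===== CLAIM (what is proved, stated in full; the proofs are below) =====
def Claim_equal_nbr_username : Prop := ∀ (username_list_all : List String), Dom_nbr_username username_list_all → Spec_nbr_username username_list_all (nbr_username username_list_all)

-- ===== LEMMAS AND PROOFS =====

-- ===== VERDICT (by name: the statement is the Claim_ definition above) =====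
theorem nbr_username_step (d : PySem.Dict String Int) (u : String) :
    (match d.get? u with
      | none => d.insert u 1
      | some v => d.insert u (v + 1)) = d.insert u (d.getD u 0 + 1) := by
  unfold PySem.Dict.getD
  cases d.get? u <;> simp

theorem nbr_username_spec : Claim_equal_nbr_username := by
  intro xs _
  unfold Spec_nbr_username nbr_username nbr_username_alt
  have h : ∀ (d : PySem.Dict String Int),
      xs.foldl (fun scoreboard username =>
        match scoreboard.get? username with
        | none => scoreboard.insert username 1
        | some v => scoreboard.insert username (v + 1)) d
      = xs.foldl (fun d x => d.insert x (d.getD x 0 + 1)) d := by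
    intro d
    induction xs generalizing d with
    | nil => rfl
    | cons x t ih => simp only [List.foldl_cons, nbr_username_step, ih]
  rw [h, PySem.Dict.foldl_insert_getD_add_one_eq_counter, PySem.Dict.items_counter,
    PySem.List.dedup_eq_ofList]
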